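-- pv_equiv track=rewrite | github.com/mohammadfaiizan/ProjectI | DSA/Problem/Trie/05_Trie_Based_Dynamic_Programming/1239_Maximum_Length_of_a_Concatenated_String_with_Unique_Characters.py | maxLength4
-- ===== SOURCE A (Python) =====
-- from typing import List, Set, Dict, Optional, Tuple
--
-- def maxLength4(arr: List[str]) -> int:
--     """
--     Approach 4: Iterative DP with List
--
--     Build up all valid combinations iteratively.
--
--     Time: O(2^n * m)
--     Space: O(2^n)
--     """
--     def has_duplicates(s: str) -> bool:
--         return len(s) != len(set(s))
--
--     # Start with empty combination
--     valid_combinations = [set()]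
--
--     for string in arr:
--         if has_duplicates(string):
--             continue
--
--         string_chars = set(string)
--         new_combinations = []
--
--         for existing_chars in valid_combinations:
--             if not (existing_chars & string_chars):  # No overlap
--                 new_combinations.append(existing_chars | string_chars)
--
--         valid_combinations.extend(new_combinations)
--
--     return max(len(chars) for chars in valid_combinations)
-- ===== SOURCE B (Python) =====
-- def maxLength4(arr):
--     """Depth-first choose/skip recursion over the duplicate-free words,
--     keeping only the current character set instead of a list of all
--     valid combinations."""
--     words = [set(s) for s in arr if len(set(s)) == len(s)]
--     n = len(words)
--
--     def dfs(i, used):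
--         if i == n:
--             return len(used)
--         best = dfs(i + 1, used)
--         w = words[i]
--         if not (used & w):
--             best = max(best, dfs(i + 1, used | w))
--         return best
--
--     return dfs(0, set())
-- ===== Notes on version B (the rewrite author's own statement) =====
-- stated objective: alternative
-- what changed: Replaces A's iteratively built list of all 2^n valid character-set combinations by a choose/skip depth-first recursion over the duplicate-free words that keeps only the current character set, reducing space from O(2^n * m) to O(n * m).
import Mathlib
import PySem

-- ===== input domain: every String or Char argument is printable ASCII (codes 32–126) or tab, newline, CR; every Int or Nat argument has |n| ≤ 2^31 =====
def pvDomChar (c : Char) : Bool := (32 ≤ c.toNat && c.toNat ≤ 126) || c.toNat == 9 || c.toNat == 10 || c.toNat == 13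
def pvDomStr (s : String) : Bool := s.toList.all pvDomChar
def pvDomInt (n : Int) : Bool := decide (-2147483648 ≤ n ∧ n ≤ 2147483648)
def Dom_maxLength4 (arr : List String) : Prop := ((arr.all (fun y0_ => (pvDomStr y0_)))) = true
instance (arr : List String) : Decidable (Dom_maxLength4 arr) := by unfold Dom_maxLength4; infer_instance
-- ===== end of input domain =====

-- B replaces A's iteratively built list of all valid combinations by a choose/skip
-- depth-first recursion over the duplicate-free words that keeps only the current
-- character set (alternative algorithm, same return value).


-- ===== PORT A =====
-- has_duplicates(s): len(s) != len(set(s))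
def pvHasDup (s : String) : Bool := decide (PySem.Str.len s ≠ PySem.List.len (PySem.Set.ofList s.toList))

-- one iteration of A's outer loop: skip duplicate words, else extend every compatible combination
def pvStepA (valid : List (PySem.Set Char)) (s : String) : List (PySem.Set Char) :=
  if pvHasDup s then valid
  else
    let stringChars : PySem.Set Char := PySem.Set.ofList s.toList
    let newCombinations := valid.foldl
      (fun acc existing =>
        if PySem.Set.inter existing stringChars == [] then
          acc ++ [PySem.Set.union existing stringChars]
        else acc) []
    valid ++ newCombinations

def maxLength4 (arr : List String) : Int :=
  let validCombinations := arr.foldl pvStepA [PySem.Set.empty]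
  -- max(len(chars) for chars in valid_combinations); the list always contains set(), so max? is some
  (PySem.List.max? (validCombinations.map (fun chars => PySem.List.len chars)) (fun x => x)).getD 0

-- ===== PORT B =====
-- dfs(i, used): choose/skip recursion over the remaining words
def pvDfs (words : List (PySem.Set Char)) (used : PySem.Set Char) : Int :=
  match words with
  | [] => PySem.List.len used
  | w :: rest =>
    let best := pvDfs rest used
    if PySem.Set.inter used w == [] then max best (pvDfs rest (PySem.Set.union used w))
    else best

def maxLength4_alt (arr : List String) : Int :=
  let words := (arr.filter
      (fun s => decide (PySem.List.len (PySem.Set.ofList s.toList) = PySem.Str.len s))).map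
      (fun s => PySem.Set.ofList s.toList)
  pvDfs words PySem.Set.empty

-- ===== PRECONDITION & SPEC =====
def Spec_maxLength4 (arr : List String) (out : Int) : Prop := out = maxLength4_alt arr
instance (arr : List String) (out : Int) : Decidable (Spec_maxLength4 arr out) := by unfold Spec_maxLength4; infer_instance

-- ===== CLAIM (what is proved, stated in full; the proofs are below) =====
def Claim_equal_maxLength4 : Prop := ∀ (arr : List String), Dom_maxLength4 arr → Spec_maxLength4 arr (maxLength4 arr)

-- ===== LEMMAS AND PROOFS =====

-- A's step specialized to the word's character set (the duplicate test already passed)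
def pvStepS (valid : List (PySem.Set Char)) (S : PySem.Set Char) : List (PySem.Set Char) :=
  valid ++ (valid.filter (fun e => PySem.Set.inter e S == [])).map
    (fun e => PySem.Set.union e S)

def pvWords (arr : List String) : List (PySem.Set Char) :=
  (arr.filter
      (fun s => decide (PySem.List.len (PySem.Set.ofList s.toList) = PySem.Str.len s))).map
    (fun s => PySem.Set.ofList s.toList)

lemma pvStepA_eq (valid : List (PySem.Set Char)) (s : String) :
    pvStepA valid s =
      if PySem.List.len (PySem.Set.ofList s.toList) = PySem.Str.len s then
        pvStepS valid (PySem.Set.ofList s.toList)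
      else valid := by
  simp only [pvStepA, pvHasDup, pvStepS]
  rw [PySem.List.foldl_append_if]
  split_ifs with h1 h2 h2 <;> simp_all

lemma pvFoldA_eq (arr : List String) (L : List (PySem.Set Char)) :
    arr.foldl pvStepA L = (pvWords arr).foldl pvStepS L := by
  induction arr generalizing L with
  | nil => rfl
  | cons s arr ih =>
    simp only [List.foldl_cons, pvWords, List.filter_cons]
    rw [pvStepA_eq]
    by_cases h : PySem.List.len (PySem.Set.ofList s.toList) = PySem.Str.len s
    · simp only [h, if_pos, decide_true]
      rw [ih]
      rfl
    · simp only [h, if_neg, not_false_eq_true, decide_false]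
      rw [ih]
      rfl

lemma pvPull (l : List (PySem.Set Char)) (f : PySem.Set Char → Int) (a b : Int) :
    l.foldl (fun x e => max x (f e)) (max a b) = max (l.foldl (fun x e => max x (f e)) a) b := by
  induction l generalizing a with
  | nil => rfl
  | cons e l ih =>
    simp only [List.foldl_cons]
    rw [show max (max a b) (f e) = max (max a (f e)) b by omega, ih]

lemma pvStep_max (S : PySem.Set Char) (ws : List (PySem.Set Char))
    (L : List (PySem.Set Char)) (acc : Int) :
    (pvStepS L S).foldl (fun a e => max a (pvDfs ws e)) acc
      = L.foldl (fun a e => max a (pvDfs (S :: ws) e)) acc := by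
  unfold pvStepS
  rw [List.foldl_append]
  induction L generalizing acc with
  | nil => rfl
  | cons e L ih =>
    simp only [List.foldl_cons, List.filter_cons]
    by_cases h : (PySem.Set.inter e S == []) = true
    · simp only [h, if_pos, List.map_cons, List.foldl_cons]
      rw [← pvPull, ih]
      have hd : pvDfs (S :: ws) e = max (pvDfs ws e) (pvDfs ws (PySem.Set.union e S)) := by
        simp [pvDfs, h]
      rw [hd, show max (max acc (pvDfs ws e)) (pvDfs ws (PySem.Set.union e S))
            = max acc (max (pvDfs ws e) (pvDfs ws (PySem.Set.union e S))) by omega]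
    · simp only [h, if_neg, Bool.false_eq_true, not_false_eq_true]
      rw [ih]
      have : pvDfs (S :: ws) e = pvDfs ws e := by simp [pvDfs, h]
      rw [this]

lemma pvMain (ws : List (PySem.Set Char)) (L : List (PySem.Set Char)) (acc : Int) :
    (ws.foldl pvStepS L).foldl (fun a e => max a (PySem.List.len e)) acc
      = L.foldl (fun a e => max a (pvDfs ws e)) acc := by
  induction ws generalizing L acc with
  | nil => rfl
  | cons S ws ih =>
    simp only [List.foldl_cons]
    rw [ih, pvStep_max]

lemma pvHead (ws : List (PySem.Set Char)) (L : List (PySem.Set Char)) :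
    ∃ t, ws.foldl pvStepS L = L ++ t := by
  induction ws generalizing L with
  | nil => exact ⟨[], by simp⟩
  | cons S ws ih =>
    obtain ⟨t, ht⟩ := ih (pvStepS L S)
    exact ⟨_, by simpa [pvStepS, List.append_assoc] using ht⟩

lemma pvDfs_nonneg (ws : List (PySem.Set Char)) (u : PySem.Set Char) : 0 ≤ pvDfs ws u := by
  induction ws generalizing u with
  | nil => simp [pvDfs, PySem.List.len_eq]
  | cons w rest ih =>
    simp only [pvDfs]
    split
    · exact le_trans (ih u) (le_max_left _ _)
    · exact ih u

-- ===== VERDICT (by name: the statement is the Claim_ definition above) =====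
theorem maxLength4_spec : Claim_equal_maxLength4 := by
  intro arr _
  unfold Spec_maxLength4 maxLength4 maxLength4_alt
  rw [pvFoldA_eq]
  obtain ⟨t, ht⟩ := pvHead (pvWords arr) [PySem.Set.empty]
  have hmain := pvMain (pvWords arr) [PySem.Set.empty] 0
  rw [ht] at hmain
  rw [ht]
  simp only [List.cons_append, List.nil_append] at hmain ⊢
  rw [List.map_cons, PySem.List.max?_id_cons, Option.getD_some, List.foldl_map]
  have hlen : PySem.List.len (PySem.Set.empty : PySem.Set Char) = 0 := rfl
  simp only [List.foldl_cons, List.foldl_nil, hlen, max_self] at hmain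
  rw [hlen, hmain]
  show max 0 (pvDfs (pvWords arr) PySem.Set.empty) = pvDfs (pvWords arr) PySem.Set.empty
  have := pvDfs_nonneg (pvWords arr) PySem.Set.empty
  omega
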